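-- pv_equiv track=rewrite | github.com/ddoromi/TIL | Algorithm/02_Application/03_greed_algorithm/5203_babygin.py | baby_gin
-- ===== SOURCE A (Python) =====
-- def baby_gin(player):
--     N = len(player)
--     player.sort()
--     count = 1
--     for i in range(N - 1):
--         if player[i] == player[i + 1]:
--             count += 1
--             if count >= 3:
--                 return 1
--         else:
--             count = 1
--     count = 1
--     for i in range(N - 1):
--         if player[i + 1] - player[i] == 1:
--             count += 1
--             if count >= 3:
--                 return 1
--         elif player[i + 1] - player[i] > 1:
--             count = 1
-- ===== SOURCE B (Python) =====
-- def baby_gin(player):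
--     player.sort()
--     # triple: in a sorted list, some value occurs >= 3 times iff player[i] == player[i+2]
--     for i in range(len(player) - 2):
--         if player[i] == player[i + 2]:
--             return 1
--     # run: deduplicate the sorted values, then look for a window of three consecutive ints
--     uniq = []
--     for i in range(len(player)):
--         if i + 1 == len(player) or player[i + 1] != player[i]:
--             uniq.append(player[i])
--     for i in range(len(uniq) - 2):
--         if uniq[i + 1] - uniq[i] == 1 and uniq[i + 2] - uniq[i + 1] == 1:
--             return 1
-- ===== Notes on version B (the rewrite author's own statement) =====
-- stated objective: simpler
-- what changed: Replaces A's two stateful counter-with-reset scans by stateless window checks: a triple exists in the sorted list iff player[i] == player[i+2], and a run exists iff the deduplicated sorted values contain a window of three consecutive integers.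
import Mathlib
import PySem

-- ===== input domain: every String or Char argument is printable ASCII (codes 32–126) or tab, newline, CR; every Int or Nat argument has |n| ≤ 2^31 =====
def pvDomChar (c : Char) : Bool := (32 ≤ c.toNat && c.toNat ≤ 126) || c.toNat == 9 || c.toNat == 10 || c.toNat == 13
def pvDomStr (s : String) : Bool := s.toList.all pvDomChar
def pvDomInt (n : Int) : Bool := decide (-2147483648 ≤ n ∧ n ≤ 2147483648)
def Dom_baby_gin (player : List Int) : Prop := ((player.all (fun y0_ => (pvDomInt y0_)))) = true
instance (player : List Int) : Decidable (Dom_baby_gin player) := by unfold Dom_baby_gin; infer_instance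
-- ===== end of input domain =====

-- B replaces A's counter-with-reset scans by stateless window checks on the sorted
-- (and, for the run, deduplicated) list; equivalence is about the return value
-- (both Pythons sort `player` in place).

-- ===== PORT A =====
-- first loop of A: adjacent-equality counter over the sorted list
def pvATriple : List Int → Int → Option Int
  | a :: b :: r, count =>
    if a = b then
      if count + 1 ≥ 3 then some 1 else pvATriple (b :: r) (count + 1)
    else pvATriple (b :: r) 1
  | _, _ => none

-- second loop of A: difference-1 counter (reset only on a gap > 1)
def pvARun : List Int → Int → Option Int
  | a :: b :: r, count =>
    if b - a = 1 then
      if count + 1 ≥ 3 then some 1 else pvARun (b :: r) (count + 1)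
    else if b - a > 1 then pvARun (b :: r) 1
    else pvARun (b :: r) count
  | _, _ => none

def baby_gin (player : List Int) : Option Int :=
  let s := PySem.List.sorted player (fun x => x) false
  match pvATriple s 1 with
  | some r => some r
  | none => pvARun s 1

-- ===== PORT B =====
-- B's first loop: player[i] == player[i+2] window on the sorted list
def pvHasTriple : List Int → Bool
  | a :: b :: c :: r => a == c || pvHasTriple (b :: c :: r)
  | _ => false

-- B's dedup loop: keep player[i] iff i is last or player[i+1] != player[i]
def pvDedup : List Int → List Int
  | a :: b :: r => if a = b then pvDedup (b :: r) else a :: pvDedup (b :: r)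
  | s => s

-- B's run loop: window of three consecutive integers in the dedup list
def pvHasRun : List Int → Bool
  | a :: b :: c :: r => (b - a == 1 && c - b == 1) || pvHasRun (b :: c :: r)
  | _ => false

def baby_gin_alt (player : List Int) : Option Int :=
  let s := PySem.List.sorted player (fun x => x) false
  if pvHasTriple s then some 1
  else if pvHasRun (pvDedup s) then some 1
  else none

-- ===== PRECONDITION & SPEC =====
def Spec_baby_gin (player : List Int) (out : Option Int) : Prop := out = baby_gin_alt player
instance (player : List Int) (out : Option Int) : Decidable (Spec_baby_gin player out) := by unfold Spec_baby_gin; infer_instance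

-- ===== CLAIM (what is proved, stated in full; the proofs are below) =====
def Claim_equal_baby_gin : Prop := ∀ (player : List Int), Dom_baby_gin player → Spec_baby_gin player (baby_gin player)

-- ===== LEMMAS AND PROOFS =====

-- three consecutive equal elements (A's first counter reaches 3 exactly here)
def pvTrip3 : List Int → Bool
  | a :: b :: c :: r => (a == b && b == c) || pvTrip3 (b :: c :: r)
  | _ => false

theorem pvATriple_char : ∀ (s : List Int),
    (pvATriple s 1 = if pvTrip3 s then some 1 else none) ∧
    (∀ a, pvATriple (a :: s) 2 =
      if (s.head? == some a || pvTrip3 (a :: s)) then some 1 else none)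
  | [] => by
    refine ⟨rfl, fun a => ?_⟩
    simp [pvATriple, pvTrip3]
  | [b] => by
    constructor
    · rfl
    · intro a
      by_cases hab : a = b
      · simp [pvATriple, hab, pvTrip3]
      · simp [pvATriple, hab, Ne.symm hab, pvTrip3]
  | b :: c :: r' => by
    have ih2 := (pvATriple_char r').2
    have ih1 := (pvATriple_char (c :: r')).1
    have h1 : pvATriple (b :: c :: r') 1 = if pvTrip3 (b :: c :: r') then some 1 else none := by
      by_cases hbc : b = c
      · subst hbc
        rw [pvATriple, if_pos rfl, if_neg (by norm_num), (by norm_num : (1:Int) + 1 = 2), ih2 b]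
        match r' with
        | [] => simp [pvTrip3]
        | d :: r'' =>
          by_cases hdb : d = b
          · simp [pvTrip3, hdb]
          · simp [pvTrip3, hdb, Ne.symm hdb]
      · rw [pvATriple, if_neg hbc, ih1]
        match r' with
        | [] => simp [pvTrip3]
        | d :: r'' => simp [pvTrip3, hbc]
    refine ⟨h1, fun a => ?_⟩
    by_cases hab : a = b
    · rw [pvATriple, if_pos hab, if_pos (by norm_num)]
      simp [hab, pvTrip3]
    · rw [pvATriple, if_neg hab, h1]
      simp [pvTrip3, hab, Ne.symm hab]

theorem pvHasTriple_eq_trip3 : ∀ (s : List Int), s.Pairwise (fun a b => a ≤ b) →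
    pvHasTriple s = pvTrip3 s
  | [] , _ => rfl
  | [_], _ => rfl
  | [_, _], _ => rfl
  | a :: b :: c :: r, hs => by
    have ih := pvHasTriple_eq_trip3 (b :: c :: r) hs.tail
    obtain ⟨hhead, htail⟩ := List.pairwise_cons.mp hs
    have hab : a ≤ b := hhead b (by simp)
    have hbc : b ≤ c := (List.pairwise_cons.mp htail).1 c (by simp)
    have hiff : (a = c) ↔ (a = b ∧ b = c) := by omega
    have hkey : (a == c) = (a == b && b == c) := by
      rw [Bool.eq_iff_iff]
      simp only [Bool.and_eq_true, beq_iff_eq]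
      exact hiff
    rw [pvHasTriple, pvTrip3, ih, hkey]

theorem pvDedup_head (a : Int) (s : List Int) : (pvDedup (a :: s)).head? = some a := by
  induction s generalizing a with
  | nil => simp [pvDedup]
  | cons b r ih =>
    by_cases h : a = b
    · rw [pvDedup, if_pos h, ih b, h]
    · rw [pvDedup, if_neg h]
      rfl

theorem pvDedup_cons_ne {x y : Int} (h : ¬ x = y) (t : List Int) :
    pvDedup (x :: y :: t) = x :: pvDedup (y :: t) := by
  rw [pvDedup, if_neg h]

theorem pvDedup_cons_eq {x y : Int} (h : x = y) (t : List Int) :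
    pvDedup (x :: y :: t) = pvDedup (y :: t) := by
  rw [pvDedup, if_pos h]

theorem pvHasRun_gap {x y : Int} (h : y - x ≠ 1) (t : List Int) :
    pvHasRun (x :: y :: t) = pvHasRun (y :: t) := by
  cases t with
  | nil => rfl
  | cons d t' => simp [pvHasRun, h]

theorem pvARun_char : ∀ (s : List Int),
    (s.Pairwise (fun a b => a ≤ b) →
      pvARun s 1 = if pvHasRun (pvDedup s) then some 1 else none) ∧
    (∀ a, (a :: s).Pairwise (fun a b => a ≤ b) →
      pvARun (a :: s) 2 =
        if ((pvDedup (a :: s)).tail.head? == some (a + 1) || pvHasRun (pvDedup (a :: s)))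
        then some 1 else none)
  | [] => by
    refine ⟨fun _ => rfl, fun a _ => ?_⟩
    simp [pvARun, pvDedup, pvHasRun]
  | [b] => by
    constructor
    · intro _
      rfl
    · intro a _
      by_cases h1 : b - a = 1
      · rw [pvARun, if_pos h1, if_pos (by norm_num)]
        have hne : ¬ a = b := by omega
        rw [pvDedup_cons_ne hne]
        simp [pvDedup, pvHasRun, (by omega : b = a + 1)]
      · by_cases h2 : b - a > 1
        · rw [pvARun, if_neg h1, if_pos h2]
          have hne : ¬ a = b := by omega
          rw [pvDedup_cons_ne hne]
          simp [pvARun, pvDedup, pvHasRun]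
          omega
        · by_cases hab : a = b
          · rw [pvARun, if_neg h1, if_neg h2, pvDedup_cons_eq hab]
            simp [pvARun, pvDedup, pvHasRun]
          · rw [pvARun, if_neg h1, if_neg h2, pvDedup_cons_ne hab]
            simp [pvARun, pvDedup, pvHasRun]
            omega
  | b :: c :: r' => by
    have ih2 := (pvARun_char r').2
    have ihc := pvARun_char (c :: r')
    have h1 : (b :: c :: r').Pairwise (fun a b => a ≤ b) →
        pvARun (b :: c :: r') 1 = if pvHasRun (pvDedup (b :: c :: r')) then some 1 else none := by
      intro hs
      obtain ⟨hhead, htail⟩ := List.pairwise_cons.mp hs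
      have hbc : b ≤ c := hhead c (by simp)
      obtain ⟨w', hw⟩ : ∃ w', pvDedup (c :: r') = c :: w' := by
        have hh := pvDedup_head c r'
        cases hd : pvDedup (c :: r') with
        | nil => rw [hd] at hh; simp at hh
        | cons x t => rw [hd] at hh; simp at hh; exact ⟨t, by rw [hh]⟩
      by_cases hc1 : c - b = 1
      · rw [pvARun, if_pos hc1, if_neg (by norm_num), (by norm_num : (1:Int) + 1 = 2), ih2 c htail]
        have hbne : ¬ b = c := by omega
        rw [pvDedup_cons_ne hbne, hw]
        match w' with
        | [] => simp [pvHasRun]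
        | d :: w'' => simp [pvHasRun, hc1, show d - c = 1 ↔ d = c + 1 from by omega]
      · by_cases hc2 : c - b > 1
        · rw [pvARun, if_neg hc1, if_pos hc2, ihc.1 htail]
          have hbne : ¬ b = c := by omega
          rw [pvDedup_cons_ne hbne, hw, pvHasRun_gap hc1]
        · have hbc' : b = c := by omega
          rw [pvARun, if_neg hc1, if_neg hc2, ihc.1 htail]
          rw [pvDedup_cons_eq hbc']
    refine ⟨h1, fun a hs => ?_⟩
    obtain ⟨hhead, htail⟩ := List.pairwise_cons.mp hs
    have hab : a ≤ b := hhead b (by simp)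
    obtain ⟨u', hu⟩ : ∃ u', pvDedup (b :: c :: r') = b :: u' := by
      have hh := pvDedup_head b (c :: r')
      cases hd : pvDedup (b :: c :: r') with
      | nil => rw [hd] at hh; simp at hh
      | cons x t => rw [hd] at hh; simp at hh; exact ⟨t, by rw [hh]⟩
    by_cases hb1 : b - a = 1
    · rw [pvARun, if_pos hb1, if_pos (by norm_num)]
      have hane : ¬ a = b := by omega
      rw [pvDedup_cons_ne hane, hu]
      simp [(by omega : b = a + 1)]
    · by_cases hb2 : b - a > 1
      · rw [pvARun, if_neg hb1, if_pos hb2, h1 htail]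
        have hane : ¬ a = b := by omega
        rw [hu, pvDedup_cons_ne hane, hu, pvHasRun_gap hb1]
        by_cases hx : pvHasRun (b :: u')
        · simp [hx]
        · simp [hx, show ¬ b = a + 1 from by omega]
      · have hab' : a = b := by omega
        rw [pvARun, if_neg hb1, if_neg hb2, ihc.2 b htail, pvDedup_cons_eq hab', hab']

-- ===== VERDICT (by name: the statement is the Claim_ definition above) =====
theorem baby_gin_spec : Claim_equal_baby_gin := by
  intro player _
  unfold Spec_baby_gin baby_gin baby_gin_alt
  have hs := PySem.List.sorted_pairwise (xs := player) (key := fun x => x)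
  set s := PySem.List.sorted player (fun x => x) false with hsdef
  have h1 : pvATriple s 1 = if pvHasTriple s then some 1 else none := by
    rw [(pvATriple_char s).1, pvHasTriple_eq_trip3 s hs]
  have h2 : pvARun s 1 = if pvHasRun (pvDedup s) then some 1 else none :=
    (pvARun_char s).1 hs
  by_cases ht : pvHasTriple s = true
  · simp [h1, ht]
  · simp [h1, h2, ht]
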